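-- pv_equiv track=rewrite | github.com/michelebastione/Advent-of-Code | 2022/day 25.py | read_snafu
-- ===== SOURCE A (Python) =====
-- def read_snafu(n):
--     num = 0
--     for i, j in enumerate(n[::-1]):
--         if j == "-":
--             num -= 5**i
--         elif j == "=":
--             num -= 2*5**i
--         else:
--             num += int(j)*5**i
--     return num
-- ===== SOURCE B (Python) =====
-- def read_snafu(n):
--     num = 0
--     for j in n:
--         num = num * 5 + (-2 if j == "=" else -1 if j == "-" else int(j))
--     return num
-- ===== Notes on version B (the rewrite author's own statement) =====
-- stated objective: idiomatic
-- what changed: Replaces the reversed-string, per-index 5**i power sum with Horner's method: a single forward pass maintaining num = num*5 + digit, no string reversal and no exponentiation.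
import Mathlib
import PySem

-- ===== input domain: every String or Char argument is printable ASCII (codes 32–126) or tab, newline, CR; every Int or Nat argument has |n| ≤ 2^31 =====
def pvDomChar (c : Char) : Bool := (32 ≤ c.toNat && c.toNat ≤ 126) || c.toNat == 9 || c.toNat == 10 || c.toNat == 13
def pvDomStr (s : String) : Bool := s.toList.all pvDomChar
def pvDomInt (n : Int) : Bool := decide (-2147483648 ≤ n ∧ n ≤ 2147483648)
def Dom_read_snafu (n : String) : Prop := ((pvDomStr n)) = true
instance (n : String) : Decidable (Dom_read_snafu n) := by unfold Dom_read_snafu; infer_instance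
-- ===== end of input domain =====

-- B replaces A's reversed-string sum of digit*5**i with a forward Horner pass (idiomatic, no reversal, no exponentiation).

-- ===== PORT A =====
-- n[::-1] is exactly List.reverse; enumerate indices start at 0 so .toNat is exact.
def read_snafu (n : String) : Int :=
  (PySem.List.enumerate n.toList.reverse).foldl
    (fun num ij =>
      if ij.2 = '-' then num - 5 ^ ij.1.toNat
      else if ij.2 = '=' then num - 2 * 5 ^ ij.1.toNat
      else num + (PySem.Int.ofStr? (String.mk [ij.2])).getD 0 * 5 ^ ij.1.toNat) 0

-- ===== PORT B =====
def read_snafu_alt (n : String) : Int :=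
  n.toList.foldl
    (fun num j =>
      num * 5 + (if j = '=' then -2 else if j = '-' then -1
                 else (PySem.Int.ofStr? (String.mk [j])).getD 0)) 0

-- ===== PRECONDITION & SPEC =====
-- Pre_ excludes exactly the strings containing a character other than '-', '=' or a
-- decimal digit: there Python's int(j) raises ValueError in both A and B.
def Pre_read_snafu (n : String) : Prop :=
  n.toList.all (fun c => c = '-' || c = '=' || ('0' ≤ c && c ≤ '9')) = true
instance (n : String) : Decidable (Pre_read_snafu n) := by unfold Pre_read_snafu; infer_instance
def pvWitness_read_snafu : String := "1=-0-2"

def Spec_read_snafu (n : String) (out : Int) : Prop := out = read_snafu_alt n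
instance (n : String) (out : Int) : Decidable (Spec_read_snafu n out) := by unfold Spec_read_snafu; infer_instance

-- ===== CLAIM (what is proved, stated in full; the proofs are below) =====
def Claim_equal_read_snafu : Prop := ∀ (n : String), Dom_read_snafu n → Pre_read_snafu n → Spec_read_snafu n (read_snafu n)

-- ===== LEMMAS AND PROOFS =====

-- the per-character digit value shared by both ports' branches
def snafuVal (c : Char) : Int :=
  if c = '=' then -2 else if c = '-' then -1
  else (PySem.Int.ofStr? (String.mk [c])).getD 0

-- "high-to-low" weighted value of a digit list
def snafuHv : List Char → Int
  | [] => 0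
  | c :: t => snafuVal c * 5 ^ t.length + snafuHv t

-- "low-to-high" weighted value (index 0 is the units digit)
def snafuAv : List Char → Int
  | [] => 0
  | c :: t => snafuVal c + 5 * snafuAv t

lemma snafuAv_append (xs : List Char) (c : Char) :
    snafuAv (xs ++ [c]) = snafuAv xs + snafuVal c * 5 ^ xs.length := by
  induction xs with
  | nil => simp [snafuAv]
  | cons x t ih => simp [snafuAv, ih, pow_succ]; ring

lemma snafuAv_reverse (l : List Char) : snafuAv l.reverse = snafuHv l := by
  induction l with
  | nil => rfl
  | cons c t ih => simp [List.reverse_cons, snafuAv_append, ih, snafuHv]; ring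

lemma readA_loop (l : List Char) (s : Nat) (num : Int) :
    (PySem.List.enumerate l (s : Int)).foldl
      (fun num ij =>
        if ij.2 = '-' then num - 5 ^ ij.1.toNat
        else if ij.2 = '=' then num - 2 * 5 ^ ij.1.toNat
        else num + (PySem.Int.ofStr? (String.mk [ij.2])).getD 0 * 5 ^ ij.1.toNat) num
      = num + 5 ^ s * snafuAv l := by
  induction l generalizing s num with
  | nil => simp [PySem.List.enumerate_nil, snafuAv]
  | cons c t ih =>
    rw [PySem.List.enumerate_cons]
    have hs : ((s : Int) + 1) = ((s + 1 : Nat) : Int) := by push_cast; ring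
    simp only [List.foldl_cons, hs, ih]
    have htn : ((s : Int)).toNat = s := Int.toNat_natCast s
    by_cases h1 : c = '-'
    · simp [h1, snafuAv, snafuVal, htn, pow_succ]; ring
    · by_cases h2 : c = '='
      · simp [h2, snafuAv, snafuVal, htn, pow_succ]; ring
      · simp [h1, h2, snafuAv, snafuVal, htn, pow_succ]; ring

lemma readB_loop (l : List Char) (num : Int) :
    l.foldl (fun num j =>
        num * 5 + (if j = '=' then -2 else if j = '-' then -1
                   else (PySem.Int.ofStr? (String.mk [j])).getD 0)) num
      = num * 5 ^ l.length + snafuHv l := by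
  induction l generalizing num with
  | nil => simp [snafuHv]
  | cons c t ih =>
    rw [List.foldl_cons,
      show (num * 5 + (if c = '=' then -2 else if c = '-' then -1
          else (PySem.Int.ofStr? (String.mk [c])).getD 0)) = num * 5 + snafuVal c from rfl,
      ih, snafuHv, List.length_cons, pow_succ]
    ring

-- ===== VERDICT (by name: the statement is the Claim_ definition above) =====
theorem read_snafu_spec : Claim_equal_read_snafu := by
  intro n _ _
  unfold Spec_read_snafu read_snafu read_snafu_alt
  have hA := readA_loop n.toList.reverse 0 0
  have hB := readB_loop n.toList 0
  simp only [Nat.cast_zero] at hA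
  rw [hA, hB, snafuAv_reverse]
  simp
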